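-- pv_equiv track=rewrite | github.com/Kinetics20/Python_practice_sessions_05 | Unit_tests/codewars_functions_.py | tacofy
-- ===== SOURCE A (Python) =====
-- def tacofy(word):
--     taco = ['shell']
--     for letter in word.lower():
--         if letter in 'aeiou':
--             taco.append('beef')
--         elif letter == 't':
--             taco.append('tomato')
--         elif letter == 'l':
--             taco.append('lettuce')
--         elif letter == 'c':
--             taco.append('cheese')
--         elif letter == 'g':
--             taco.append('guacamole')
--         elif letter == 's':
--             taco.append('salsa')
--     taco.append('shell')
--     return taco
-- ===== SOURCE B (Python) =====
-- MENU = (('a', 'beef'), ('e', 'beef'), ('i', 'beef'), ('o', 'beef'), ('u', 'beef'),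
--         ('t', 'tomato'), ('l', 'lettuce'), ('c', 'cheese'), ('g', 'guacamole'), ('s', 'salsa'))
--
--
-- def tacofy(word):
--     w = word.lower()
--     hits = []
--     for letter, ingredient in MENU:
--         for i, ch in enumerate(w):
--             if ch == letter:
--                 hits.append((i, ingredient))
--     hits.sort(key=lambda h: h[0])
--     return ['shell'] + [ingredient for _, ingredient in hits] + ['shell']
-- ===== Notes on version B (the rewrite author's own statement) =====
-- stated objective: alternative
-- what changed: Instead of A's single ordered pass with a five-way if/elif cascade appending as it goes, B scans the word once per ingredient collecting (position, ingredient) hits, then sorts the hits by position and emits their ingredients between the two shells.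
import Mathlib
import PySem

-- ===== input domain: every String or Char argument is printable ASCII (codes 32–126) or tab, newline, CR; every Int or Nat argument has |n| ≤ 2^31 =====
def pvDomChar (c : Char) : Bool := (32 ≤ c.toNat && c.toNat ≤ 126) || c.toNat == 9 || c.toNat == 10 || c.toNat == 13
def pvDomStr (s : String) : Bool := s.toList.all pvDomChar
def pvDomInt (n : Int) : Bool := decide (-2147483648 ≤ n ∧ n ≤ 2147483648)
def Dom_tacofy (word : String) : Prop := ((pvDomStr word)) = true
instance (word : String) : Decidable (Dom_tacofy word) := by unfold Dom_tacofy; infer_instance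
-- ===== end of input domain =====

-- B replaces A's single in-order pass with an if/elif cascade by per-ingredient scans that
-- collect (position, ingredient) hits, then sorts the hits by position ('alternative'; same practical cost).

-- ===== PORT A =====
def tacofyStep (taco : List String) (letter : Char) : List String :=
  if ['a','e','i','o','u'].contains letter then taco ++ ["beef"]
  else if letter = 't' then taco ++ ["tomato"]
  else if letter = 'l' then taco ++ ["lettuce"]
  else if letter = 'c' then taco ++ ["cheese"]
  else if letter = 'g' then taco ++ ["guacamole"]
  else if letter = 's' then taco ++ ["salsa"]
  else taco

def tacofy (word : String) : List String :=
  ((PySem.Chars.lower word.toList).foldl tacofyStep ["shell"]) ++ ["shell"]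

-- ===== PORT B =====
def tacoMenu : List (Char × String) :=
  [('a', "beef"), ('e', "beef"), ('i', "beef"), ('o', "beef"), ('u', "beef"),
   ('t', "tomato"), ('l', "lettuce"), ('c', "cheese"), ('g', "guacamole"), ('s', "salsa")]

-- Source B's hits.sort(key=lambda h: h[0]) is PySem.List.sorted with key fst (Python's stable sort; exact)
def tacofy_alt (word : String) : List String :=
  let w := PySem.Chars.lower word.toList
  let hits := tacoMenu.foldl (fun acc p =>
    (PySem.List.enumerate w 0).foldl (fun acc2 ic =>
      if ic.2 = p.1 then acc2 ++ [(ic.1, p.2)] else acc2) acc) []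
  let sortedHits := PySem.List.sorted hits Prod.fst false
  ["shell"] ++ sortedHits.map Prod.snd ++ ["shell"]

-- ===== PRECONDITION & SPEC =====
def Spec_tacofy (word : String) (out : List String) : Prop := out = tacofy_alt word
instance (word : String) (out : List String) : Decidable (Spec_tacofy word out) := by unfold Spec_tacofy; infer_instance

-- ===== CLAIM (what is proved, stated in full; the proofs are below) =====
def Claim_equal_tacofy : Prop := ∀ (word : String), Dom_tacofy word → Spec_tacofy word (tacofy word)

-- ===== LEMMAS AND PROOFS =====

-- the letter → ingredient mapping both programs encode, as a function (proof helper)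
def tacoTab (c : Char) : Option String :=
  if c = 'a' ∨ c = 'e' ∨ c = 'i' ∨ c = 'o' ∨ c = 'u' then some "beef"
  else if c = 't' then some "tomato"
  else if c = 'l' then some "lettuce"
  else if c = 'c' then some "cheese"
  else if c = 'g' then some "guacamole"
  else if c = 's' then some "salsa"
  else none

-- the canonical in-order hit list (positions paired with ingredients, in word order)
def hitsL (s : Int) (w : List Char) : List (Int × String) :=
  match w with
  | [] => []
  | c :: rest =>
    (match tacoTab c with
     | some g => [(s, g)]
     | none => []) ++ hitsL (s + 1) rest

-- A's step appends exactly the table entry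
lemma tacofyStep_eq (acc : List String) (c : Char) :
    tacofyStep acc c = acc ++ (tacoTab c).toList := by
  unfold tacofyStep tacoTab
  by_cases h1 : c = 'a'; · simp [h1]
  by_cases h2 : c = 'e'; · simp [h2]
  by_cases h3 : c = 'i'; · simp [h3]
  by_cases h4 : c = 'o'; · simp [h4]
  by_cases h5 : c = 'u'; · simp [h5]
  simp only [List.contains_eq_mem, List.mem_cons, List.not_mem_nil, or_false, decide_eq_true_eq,
    h1, h2, h3, h4, h5, if_false]
  split_ifs <;> simp

-- A's loop produces the ingredients of the in-order hit list
lemma foldl_step_eq (cs : List Char) (acc : List String) (s : Int) :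
    cs.foldl tacofyStep acc = acc ++ (hitsL s cs).map Prod.snd := by
  induction cs generalizing acc s with
  | nil => simp [hitsL]
  | cons c rest ih =>
    simp only [List.foldl_cons, ih _ (s + 1), tacofyStep_eq, hitsL]
    cases tacoTab c <;> simp

-- one per-ingredient scan of Source B, as a filter of the enumeration
def scanF (w : List Char) (s : Int) (p : Char × String) : List (Int × String) :=
  ((PySem.List.enumerate w s).filter (fun ic => ic.2 = p.1)).map (fun ic => (ic.1, p.2))

lemma hits_eq_flatMap (w : List Char) (s : Int) (m : List (Char × String)) :
    m.foldl (fun acc p =>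
      (PySem.List.enumerate w s).foldl (fun acc2 ic =>
        if ic.2 = p.1 then acc2 ++ [(ic.1, p.2)] else acc2) acc) []
    = m.flatMap (scanF w s) := by
  have h : ∀ (p : Char × String) (acc : List (Int × String)),
      (PySem.List.enumerate w s).foldl (fun acc2 ic =>
        if ic.2 = p.1 then acc2 ++ [(ic.1, p.2)] else acc2) acc = acc ++ scanF w s p := by
    intro p acc
    have := PySem.List.foldl_append_if (fun ic : Int × Char => decide (ic.2 = p.1))
      (fun ic => (ic.1, p.2)) (PySem.List.enumerate w s) acc
    simpa [scanF] using this
  simp only [h]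
  exact PySem.List.foldl_append_eq_flatMap (scanF w s) m []

lemma flatMap_append_perm {α β : Type} (xs : List α) (f g : α → List β) :
    (xs.flatMap (fun x => f x ++ g x)).Perm (xs.flatMap f ++ xs.flatMap g) := by
  induction xs with
  | nil => simp
  | cons x xs ih =>
    simp only [List.flatMap_cons, List.append_assoc]
    refine ((ih.append_left (g x)).append_left (f x)).trans ?_
    exact (List.perm_append_comm_assoc _ _ _).append_left _

lemma scanF_cons (c : Char) (rest : List Char) (s : Int) (p : Char × String) :
    scanF (c :: rest) s p =
      (if c = p.1 then [(s, p.2)] else []) ++ scanF rest (s + 1) p := by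
  simp only [scanF, PySem.List.enumerate_cons, List.filter_cons]
  by_cases h : c = p.1 <;> simp [h]

-- the head contributions of all menu entries, at one character
lemma menu_head_eq (c : Char) (s : Int) :
    tacoMenu.flatMap (fun p => if c = p.1 then [(s, p.2)] else [])
      = (hitsL s [c]).map (fun q => q) := by
  by_cases h1 : c = 'a'; · simp [h1, tacoMenu, hitsL, tacoTab]
  by_cases h2 : c = 'e'; · simp [h2, tacoMenu, hitsL, tacoTab]
  by_cases h3 : c = 'i'; · simp [h3, tacoMenu, hitsL, tacoTab]
  by_cases h4 : c = 'o'; · simp [h4, tacoMenu, hitsL, tacoTab]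
  by_cases h5 : c = 'u'; · simp [h5, tacoMenu, hitsL, tacoTab]
  by_cases h6 : c = 't'; · simp [h6, tacoMenu, hitsL, tacoTab]
  by_cases h7 : c = 'l'; · simp [h7, tacoMenu, hitsL, tacoTab]
  by_cases h8 : c = 'c'; · simp [h8, tacoMenu, hitsL, tacoTab]
  by_cases h9 : c = 'g'; · simp [h9, tacoMenu, hitsL, tacoTab]
  by_cases h10 : c = 's'; · simp [h10, tacoMenu, hitsL, tacoTab]
  simp [tacoMenu, hitsL, tacoTab, h1, h2, h3, h4, h5, h6, h7, h8, h9, h10]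

lemma flatMap_scan_perm (w : List Char) (s : Int) :
    (tacoMenu.flatMap (scanF w s)).Perm (hitsL s w) := by
  induction w generalizing s with
  | nil => simp [scanF, hitsL, PySem.List.enumerate]
  | cons c rest ih =>
    have hstep : scanF (c :: rest) s
        = fun p => (if c = p.1 then [(s, p.2)] else []) ++ scanF rest (s + 1) p :=
      funext (scanF_cons c rest s)
    rw [hstep]
    refine (flatMap_append_perm tacoMenu _ _).trans ?_
    rw [menu_head_eq]
    have : hitsL s (c :: rest) = (hitsL s [c]).map (fun q => q) ++ hitsL (s + 1) rest := by
      simp [hitsL]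
    rw [this]
    exact (ih (s + 1)).append_left _

lemma hitsL_bound (w : List Char) (s : Int) : ∀ p ∈ hitsL s w, s ≤ p.1 := by
  induction w generalizing s with
  | nil => simp [hitsL]
  | cons c rest ih =>
    intro p hp
    simp only [hitsL, List.mem_append] at hp
    rcases hp with hp | hp
    · cases h : tacoTab c <;> simp [h] at hp
      simp [hp]
    · have := ih (s + 1) p hp; omega

lemma hitsL_pairwise (w : List Char) (s : Int) :
    (hitsL s w).Pairwise (fun a b => a.1 < b.1) := by
  induction w generalizing s with
  | nil => simp [hitsL]
  | cons c rest ih =>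
    simp only [hitsL]
    refine List.pairwise_append.mpr ⟨?_, ih (s + 1), ?_⟩
    · cases h : tacoTab c <;> simp
    · intro a ha b hb
      have hb' := hitsL_bound rest (s + 1) b hb
      cases h : tacoTab c with
      | none => simp [h] at ha
      | some g =>
        simp [h] at ha
        subst ha
        show s < b.1
        omega

-- ===== VERDICT (by name: the statement is the Claim_ definition above) =====
theorem tacofy_spec : Claim_equal_tacofy := by
  intro word _
  unfold Spec_tacofy tacofy tacofy_alt
  dsimp only
  rw [hits_eq_flatMap,
      PySem.List.sorted_eq_of_perm_of_pairwise_lt _ _ Prod.fst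
        (flatMap_scan_perm (PySem.Chars.lower word.toList) 0).symm
        (hitsL_pairwise (PySem.Chars.lower word.toList) 0),
      foldl_step_eq _ _ 0]
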